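-- pv_equiv track=rewrite | github.com/uchiha-vivek-web/2025-DSA | leetcode-daily/maximum-difference.py | maximumDifferenceConstraint1
-- ===== SOURCE A (Python) =====
-- from typing import List
--
-- def maximumDifferenceConstraint1(nums:List[int]):
--     max_difference=-1
--     n=len(nums)
--     for i in range(n):
--         for j in range(i+1,n):
--             if (j-i) %2==0 and nums[j] - nums[i]:
--                 max_difference = max(max_difference,nums[j]-nums[i])
--     return max_difference
-- ===== SOURCE B (Python) =====
-- from typing import List
--
-- def maximumDifferenceConstraint1(nums: List[int]):
--     # One pass: for each index parity keep the running minimum of earlier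
--     # elements; a later element v at the same parity beats the answer iff v > min.
--     ans = -1
--     best_min = [None, None]  # running min of elements at even/odd positions
--     for j, v in enumerate(nums):
--         m = best_min[j % 2]
--         if m is not None and v > m:
--             d = v - m
--             if d > ans:
--                 ans = d
--         if m is None or v < m:
--             best_min[j % 2] = v
--     return ans
-- ===== Notes on version B (the rewrite author's own statement) =====
-- stated objective: faster
-- what changed: Replaced the O(n^2) all-pairs double loop with a single pass that keeps, per index parity, the running minimum of earlier elements and updates the answer only when the current element exceeds that minimum.
import Mathlib
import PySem

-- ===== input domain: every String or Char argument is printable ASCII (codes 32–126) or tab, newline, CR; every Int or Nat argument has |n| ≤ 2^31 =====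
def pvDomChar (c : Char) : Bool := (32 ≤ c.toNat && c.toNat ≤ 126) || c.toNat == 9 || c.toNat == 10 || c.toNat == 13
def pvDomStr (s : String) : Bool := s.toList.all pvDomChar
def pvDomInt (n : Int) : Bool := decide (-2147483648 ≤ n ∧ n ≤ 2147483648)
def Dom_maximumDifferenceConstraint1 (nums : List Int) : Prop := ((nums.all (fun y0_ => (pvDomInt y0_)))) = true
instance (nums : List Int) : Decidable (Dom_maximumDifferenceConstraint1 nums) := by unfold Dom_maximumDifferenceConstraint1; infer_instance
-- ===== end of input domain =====

-- B replaces A's O(n^2) all-pairs double loop by a single pass keeping, per index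
-- parity, the running minimum of earlier elements (objective: faster, asymptotic).

-- ===== PORT A =====
-- literal port of A: nested for-loops over range(n) / range(i+1, n), maximising
-- nums[j]-nums[i] over pairs with (j-i) % 2 == 0 and nums[j]-nums[i] truthy (≠ 0).
def maximumDifferenceConstraint1 (nums : List Int) : Int :=
  (PySem.List.pyRange 0 (PySem.List.len nums)).foldl (fun md i =>
    (PySem.List.pyRange (i + 1) (PySem.List.len nums)).foldl (fun md j =>
      if PySem.Int.mod (j - i) 2 = 0 ∧
          PySem.List.pyGetD nums j 0 - PySem.List.pyGetD nums i 0 ≠ 0 then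
        max md (PySem.List.pyGetD nums j 0 - PySem.List.pyGetD nums i 0)
      else md) md) (-1)

-- ===== PORT B =====
-- one step of B's loop body over (ans, best_min[0], best_min[1]) and (j, v)
def pvStepB (s : Int × Option Int × Option Int) (jv : Int × Int) :
    Int × Option Int × Option Int :=
  let m := if PySem.Int.mod jv.1 2 = 0 then s.2.1 else s.2.2
  let ans :=
    match m with
    | none => s.1
    | some mv => if mv < jv.2 then (if s.1 < jv.2 - mv then jv.2 - mv else s.1) else s.1
  let m' : Option Int :=
    match m with
    | none => some jv.2
    | some mv => if jv.2 < mv then some jv.2 else some mv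
  if PySem.Int.mod jv.1 2 = 0 then (ans, m', s.2.2) else (ans, s.2.1, m')

-- literal port of B: fold of the loop body over enumerate(nums)
def maximumDifferenceConstraint1_alt (nums : List Int) : Int :=
  ((PySem.List.enumerate nums 0).foldl pvStepB (-1, none, none)).1

-- ===== PRECONDITION & SPEC =====
def Spec_maximumDifferenceConstraint1 (nums : List Int) (out : Int) : Prop := out = maximumDifferenceConstraint1_alt nums
instance (nums : List Int) (out : Int) : Decidable (Spec_maximumDifferenceConstraint1 nums out) := by unfold Spec_maximumDifferenceConstraint1; infer_instance

-- ===== CLAIM (what is proved, stated in full; the proofs are below) =====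
def Claim_equal_maximumDifferenceConstraint1 : Prop := ∀ (nums : List Int), Dom_maximumDifferenceConstraint1 nums → Spec_maximumDifferenceConstraint1 nums (maximumDifferenceConstraint1 nums)

-- ===== LEMMAS AND PROOFS =====

-- values at positions of a given index parity
def pvCls (p : Int) (xs : List Int) : List Int :=
  ((PySem.List.enumerate xs 0).filter (fun q => decide (PySem.Int.mod q.1 2 = p))).map (·.2)

-- running minimum as an Option-valued fold (B's best_min update)
def pvMfold (l : List Int) : Option Int :=
  l.foldl (fun o x => some (o.elim x (fun m => min m x))) none

lemma pvParity_iff (N i : Int) :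
    (PySem.Int.mod (N - i) 2 = 0) ↔ PySem.Int.mod i 2 = PySem.Int.mod N 2 := by
  rw [PySem.Int.mod_eq_emod_of_pos (by norm_num), PySem.Int.mod_eq_emod_of_pos (by norm_num),
    PySem.Int.mod_eq_emod_of_pos (by norm_num)]
  omega

lemma pvFoldl_maxP {α : Type} (f : Int → α → Int)
    (hf : ∀ x a b, f (max a b) x = max (f a x) b) :
    ∀ (l : List α) (a b : Int), l.foldl f (max a b) = max (l.foldl f a) b := by
  intro l
  induction l with
  | nil => intro a b; rfl
  | cons x t ih => intro a b; simp only [List.foldl_cons, hf x a b, ih]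

lemma pvFoldl_split {α : Type} (l : List α) (f : Int → α → Int) (c : α → Prop)
    [DecidablePred c] (d : α → Int)
    (hf : ∀ x a b, f (max a b) x = max (f a x) b) (a : Int) :
    l.foldl (fun md x => if c x then max (f md x) (d x) else f md x) a
      = l.foldl (fun md x => if c x then max md (d x) else md) (l.foldl f a) := by
  induction l generalizing a with
  | nil => rfl
  | cons x t ih =>
    simp only [List.foldl_cons]
    rw [ih]
    congr 1
    split_ifs with h
    · exact pvFoldl_maxP f hf t _ _
    · rfl

lemma pvFoldl_ge {α : Type} (f : Int → α → Int) (h : ∀ a x, a ≤ f a x) :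
    ∀ (l : List α) (a : Int), a ≤ l.foldl f a := by
  intro l
  induction l with
  | nil => intro a; exact le_refl a
  | cons x t ih => intro a; exact le_trans (h a x) (ih (f a x))

lemma pvFoldl_max_le {α : Type} (l : List α) (g : α → Int) (md : Int)
    (h : ∀ y ∈ l, g y ≤ md) :
    l.foldl (fun a y => max a (g y)) md = md := by
  induction l with
  | nil => rfl
  | cons x t ih =>
    simp only [List.foldl_cons]
    rw [max_eq_left (h x List.mem_cons_self)]
    exact ih (fun y hy => h y (List.mem_cons_of_mem x hy))

lemma pvFoldl_max_eq {α : Type} (l : List α) (g : α → Int) (x0 : α) (md : Int)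
    (hmem : x0 ∈ l) (hmax : ∀ y ∈ l, g y ≤ g x0) :
    l.foldl (fun a y => max a (g y)) md = max md (g x0) := by
  induction l generalizing md with
  | nil => cases hmem
  | cons x t ih =>
    simp only [List.foldl_cons]
    rcases List.mem_cons.mp hmem with h | h
    · subst h
      rcases Classical.em (x0 ∈ t) with ht | ht
      · rw [ih (max md (g x0)) ht (fun y hy => hmax y (List.mem_cons_of_mem x0 hy)),
          max_assoc, max_self]
      · rw [pvFoldl_max_le t g _ (fun y hy =>
          le_trans (hmax y (List.mem_cons_of_mem x0 hy)) (le_max_right md (g x0)))]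
    · rw [ih (max md (g x)) h (fun y hy => hmax y (List.mem_cons_of_mem x hy))]
      rw [max_assoc, max_eq_right (hmax x List.mem_cons_self)]

lemma pvMfold_aux (l : List Int) :
    ∀ (o : Option Int) (m : Int),
      l.foldl (fun o x => some (o.elim x (fun a => min a x))) o = some m →
      (o = some m ∨ m ∈ l) ∧ (∀ a, o = some a → m ≤ a) ∧ (∀ x ∈ l, m ≤ x) := by
  induction l with
  | nil =>
    intro o m h
    simp only [List.foldl_nil] at h
    refine ⟨Or.inl h, fun a ha => ?_, fun x hx => by simp at hx⟩
    rw [h] at ha; exact le_of_eq (Option.some.inj ha)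
  | cons x t ih =>
    intro o m h
    simp only [List.foldl_cons] at h
    obtain ⟨h1, h2, h3⟩ := ih _ m h
    have hmc : m ≤ o.elim x (fun a => min a x) := h2 _ rfl
    constructor
    · rcases h1 with h1 | h1
      · have hm := Option.some.inj h1
        cases o with
        | none =>
          simp only [Option.elim] at hm
          exact Or.inr (by rw [← hm]; exact List.mem_cons_self)
        | some a0 =>
          simp only [Option.elim] at hm
          rcases le_total a0 x with hle | hle
          · left; rw [← hm, min_eq_left hle]
          · right; rw [← hm, min_eq_right hle]; exact List.mem_cons_self
      · exact Or.inr (List.mem_cons_of_mem x h1)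
    · constructor
      · intro a ha; subst ha
        simp only [Option.elim] at hmc
        exact le_trans hmc (min_le_left _ _)
      · intro y hy
        rcases List.mem_cons.mp hy with hy | hy
        · subst hy
          cases o with
          | none => exact hmc
          | some a0 => exact le_trans hmc (min_le_right _ _)
        · exact h3 y hy

lemma pvMfold_ne_none (t : List Int) :
    ∀ (x0 : Int), t.foldl (fun o x => some (o.elim x (fun a => min a x))) (some x0) ≠ none := by
  induction t with
  | nil => intro x0 hc; exact Option.some_ne_none _ hc
  | cons y s ihs => intro x0 hc; exact ihs _ hc

lemma pvMfold_eq_none (l : List Int) : pvMfold l = none ↔ l = [] := by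
  constructor
  · intro h
    cases l with
    | nil => rfl
    | cons x t =>
      exfalso
      unfold pvMfold at h
      simp only [List.foldl_cons] at h
      exact pvMfold_ne_none t x h
  · intro h; subst h; rfl

lemma pvMfold_some (l : List Int) (m : Int) (h : pvMfold l = some m) :
    m ∈ l ∧ ∀ x ∈ l, m ≤ x := by
  obtain ⟨h1, _, h3⟩ := pvMfold_aux l none m h
  rcases h1 with h1 | h1
  · cases h1
  · exact ⟨h1, h3⟩

lemma pvMfold_snoc (l : List Int) (v : Int) :
    pvMfold (l ++ [v]) = some ((pvMfold l).elim v (fun m => min m v)) := by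
  unfold pvMfold
  rw [List.foldl_append]
  rfl

-- membership in the parity class
lemma pvMem_cls (p : Int) (xs : List Int) (m : Int) :
    m ∈ pvCls p xs ↔ ∃ q ∈ PySem.List.enumerate xs 0, PySem.Int.mod q.1 2 = p ∧ q.2 = m := by
  unfold pvCls
  simp only [List.mem_map, List.mem_filter, decide_eq_true_eq]
  constructor
  · rintro ⟨q, ⟨hq, hp⟩, hv⟩; exact ⟨q, hq, hp, hv⟩
  · rintro ⟨q, hq, hp, hv⟩; exact ⟨q, ⟨hq, hp⟩, hv⟩

-- the inner fold of A satisfies the max-distribution property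
lemma pvInner_maxP (nums : List Int) (n : Int) :
    ∀ (i : Int) (a b : Int),
      (PySem.List.pyRange (i + 1) n).foldl (fun md j =>
        if PySem.Int.mod (j - i) 2 = 0 ∧
            PySem.List.pyGetD nums j 0 - PySem.List.pyGetD nums i 0 ≠ 0 then
          max md (PySem.List.pyGetD nums j 0 - PySem.List.pyGetD nums i 0)
        else md) (max a b)
      = max ((PySem.List.pyRange (i + 1) n).foldl (fun md j =>
          if PySem.Int.mod (j - i) 2 = 0 ∧
              PySem.List.pyGetD nums j 0 - PySem.List.pyGetD nums i 0 ≠ 0 then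
            max md (PySem.List.pyGetD nums j 0 - PySem.List.pyGetD nums i 0)
          else md) a) b := by
  intro i a b
  apply pvFoldl_maxP
  intro x a b
  split_ifs with h
  · exact max_right_comm a b _
  · rfl

lemma pvGetD_append_lt (xs : List Int) (v i : Int) (h0 : 0 ≤ i) (h1 : i < (xs.length : Int)) :
    PySem.List.pyGetD (xs ++ [v]) i 0 = PySem.List.pyGetD xs i 0 := by
  rw [PySem.List.pyGetD_eq_getElem _ _ h0 (by simp; omega),
    PySem.List.pyGetD_eq_getElem _ _ h0 h1]
  exact List.getElem_append_left (by omega)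

lemma pvGetD_append_len (xs : List Int) (v : Int) :
    PySem.List.pyGetD (xs ++ [v]) ((xs.length : Int)) 0 = v := by
  rw [PySem.List.pyGetD_eq_getElem _ _ (by positivity) (by simp)]
  simp

-- A on xs ++ [v]: A on xs, then one max-update per earlier same-parity index
lemma pvA_snoc (xs : List Int) (v : Int) :
    maximumDifferenceConstraint1 (xs ++ [v]) =
      (PySem.List.pyRange 0 ((xs.length : Int))).foldl (fun md i =>
        if PySem.Int.mod ((xs.length : Int) - i) 2 = 0 ∧ v - PySem.List.pyGetD xs i 0 ≠ 0 then
          max md (v - PySem.List.pyGetD xs i 0)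
        else md) (maximumDifferenceConstraint1 xs) := by
  have hN : (0 : Int) ≤ (xs.length : Int) := by positivity
  have hlen : PySem.List.len (xs ++ [v]) = (xs.length : Int) + 1 := by
    simp [PySem.List.len_eq]
  unfold maximumDifferenceConstraint1
  rw [hlen]
  rw [PySem.List.pyRange_one_succ_right hN, List.foldl_append]
  simp only [List.foldl_cons, List.foldl_nil]
  rw [PySem.List.pyRange_one_eq_nil (le_refl ((xs.length : Int) + 1)), List.foldl_nil]
  simp only [PySem.List.len_eq]
  rw [PySem.List.foldl_congr_mem _ _
      (fun md i =>
        if PySem.Int.mod ((xs.length : Int) - i) 2 = 0 ∧ v - PySem.List.pyGetD xs i 0 ≠ 0 then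
          max ((PySem.List.pyRange (i + 1) ((xs.length : Int))).foldl (fun md j =>
            if PySem.Int.mod (j - i) 2 = 0 ∧
                PySem.List.pyGetD xs j 0 - PySem.List.pyGetD xs i 0 ≠ 0 then
              max md (PySem.List.pyGetD xs j 0 - PySem.List.pyGetD xs i 0)
            else md) md) (v - PySem.List.pyGetD xs i 0)
        else (PySem.List.pyRange (i + 1) ((xs.length : Int))).foldl (fun md j =>
            if PySem.Int.mod (j - i) 2 = 0 ∧
                PySem.List.pyGetD xs j 0 - PySem.List.pyGetD xs i 0 ≠ 0 then
              max md (PySem.List.pyGetD xs j 0 - PySem.List.pyGetD xs i 0)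
            else md) md) _ ?hcongr]
  · exact pvFoldl_split (PySem.List.pyRange 0 ((xs.length : Int)))
      (fun md i => (PySem.List.pyRange (i + 1) ((xs.length : Int))).foldl (fun md j =>
        if PySem.Int.mod (j - i) 2 = 0 ∧
            PySem.List.pyGetD xs j 0 - PySem.List.pyGetD xs i 0 ≠ 0 then
          max md (PySem.List.pyGetD xs j 0 - PySem.List.pyGetD xs i 0)
        else md) md)
      (fun i => PySem.Int.mod ((xs.length : Int) - i) 2 = 0 ∧ v - PySem.List.pyGetD xs i 0 ≠ 0)
      (fun i => v - PySem.List.pyGetD xs i 0)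
      (pvInner_maxP xs ((xs.length : Int))) (-1)
  case hcongr =>
    intro acc i hi
    obtain ⟨hi0, hiN⟩ := PySem.List.mem_pyRange_one.mp hi
    rw [PySem.List.pyRange_one_succ_right (by omega : i + 1 ≤ (xs.length : Int)),
      List.foldl_append]
    simp only [List.foldl_cons, List.foldl_nil]
    rw [PySem.List.foldl_congr_mem _ _
        (fun md j =>
          if PySem.Int.mod (j - i) 2 = 0 ∧
              PySem.List.pyGetD xs j 0 - PySem.List.pyGetD xs i 0 ≠ 0 then
            max md (PySem.List.pyGetD xs j 0 - PySem.List.pyGetD xs i 0)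
          else md) acc ?hinner]
    · rw [pvGetD_append_len, pvGetD_append_lt xs v i hi0 hiN]
    case hinner =>
      intro acc2 j hj
      obtain ⟨hj1, hj2⟩ := PySem.List.mem_pyRange_one.mp hj
      rw [pvGetD_append_lt xs v j (by omega) hj2, pvGetD_append_lt xs v i hi0 hiN]

-- characterisation of the per-parity update via the running minimum
lemma pvEall_char (xs : List Int) (v md : Int) (hmd : -1 ≤ md) :
    (PySem.List.pyRange 0 ((xs.length : Int))).foldl (fun md i =>
      if PySem.Int.mod ((xs.length : Int) - i) 2 = 0 ∧ v - PySem.List.pyGetD xs i 0 ≠ 0 then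
        max md (v - PySem.List.pyGetD xs i 0)
      else md) md
    = match pvMfold (pvCls (PySem.Int.mod ((xs.length : Int)) 2) xs) with
      | none => md
      | some m => if m < v then max md (v - m) else md := by
  have hrw : (PySem.List.pyRange 0 ((xs.length : Int))).foldl (fun md i =>
      if PySem.Int.mod ((xs.length : Int) - i) 2 = 0 ∧ v - PySem.List.pyGetD xs i 0 ≠ 0 then
        max md (v - PySem.List.pyGetD xs i 0)
      else md) md
      = (PySem.List.enumerate xs 0).foldl (fun md q =>
          if PySem.Int.mod ((xs.length : Int) - q.1) 2 = 0 ∧ v - q.2 ≠ 0 then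
            max md (v - q.2)
          else md) md := by
    rw [PySem.List.enumerate_eq_map_pyRange xs 0, List.foldl_map]
    simp only [PySem.List.len_eq]
  rw [hrw]
  rw [PySem.List.foldl_ite_eq_foldl_filter
      (fun q : Int × Int =>
        PySem.Int.mod ((xs.length : Int) - q.1) 2 = 0 ∧ v - q.2 ≠ 0)
      (fun md q => max md (v - q.2)) (PySem.List.enumerate xs 0) md]
  cases hc : pvMfold (pvCls (PySem.Int.mod ((xs.length : Int)) 2) xs) with
  | none =>
    have hcls : pvCls (PySem.Int.mod ((xs.length : Int)) 2) xs = [] :=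
      (pvMfold_eq_none _).mp hc
    have hl2 : (PySem.List.enumerate xs 0).filter (fun q =>
        decide (PySem.Int.mod ((xs.length : Int) - q.1) 2 = 0 ∧ v - q.2 ≠ 0)) = [] := by
      apply List.filter_eq_nil_iff.mpr
      intro q hq
      simp only [decide_eq_true_eq, not_and, ne_eq, not_not]
      intro hpar
      by_contra hne
      have hmem : q.2 ∈ pvCls (PySem.Int.mod ((xs.length : Int)) 2) xs :=
        (pvMem_cls _ _ _).mpr ⟨q, hq, (pvParity_iff _ _).mp hpar, rfl⟩
      rw [hcls] at hmem
      exact absurd hmem (by simp)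
    rw [hl2]
    rfl
  | some m =>
    obtain ⟨hm_mem, hm_min⟩ := pvMfold_some _ m hc
    obtain ⟨q0, hq0M, hq0p, hq0v⟩ := (pvMem_cls _ _ _).mp hm_mem
    have hle : ∀ q ∈ (PySem.List.enumerate xs 0).filter (fun q =>
        decide (PySem.Int.mod ((xs.length : Int) - q.1) 2 = 0 ∧ v - q.2 ≠ 0)),
        m ≤ q.2 ∧ q.2 ≠ v := by
      intro q hq
      obtain ⟨hqM, hqc⟩ := List.mem_filter.mp hq
      simp only [decide_eq_true_eq] at hqc
      refine ⟨hm_min _ ((pvMem_cls _ _ _).mpr ⟨q, hqM, (pvParity_iff _ _).mp hqc.1, rfl⟩), ?_⟩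
      intro hv; exact hqc.2 (by omega)
    dsimp only
    by_cases hlt : m < v
    · rw [if_pos hlt, ← hq0v]
      apply pvFoldl_max_eq _ _ q0 md
      · refine List.mem_filter.mpr ⟨hq0M, ?_⟩
        simp only [decide_eq_true_eq]
        exact ⟨(pvParity_iff _ _).mpr hq0p, by omega⟩
      · intro q hq
        have := (hle q hq).1
        simp only [hq0v]
        omega
    · rw [if_neg hlt]
      apply pvFoldl_max_le
      intro q hq
      obtain ⟨h1, h2⟩ := hle q hq
      omega

lemma pvA_ge (nums : List Int) : -1 ≤ maximumDifferenceConstraint1 nums := by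
  unfold maximumDifferenceConstraint1
  apply pvFoldl_ge
  intro a i
  apply pvFoldl_ge
  intro b j
  split_ifs with h
  · exact le_max_left _ _
  · exact le_refl b

lemma pvCls_snoc (p : Int) (xs : List Int) (v : Int) :
    pvCls p (xs ++ [v]) =
      pvCls p xs ++ (if PySem.Int.mod ((xs.length : Int)) 2 = p then [v] else []) := by
  unfold pvCls
  rw [PySem.List.enumerate_append, List.filter_append, List.map_append]
  congr 1
  by_cases h : ((xs.length : Int)) % 2 = p
  · simp [PySem.List.enumerate_cons, PySem.List.enumerate_nil, h]
  · simp [PySem.List.enumerate_cons, PySem.List.enumerate_nil, h]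

-- B's loop state after processing xs
lemma pvB_state (xs : List Int) :
    (PySem.List.enumerate xs 0).foldl pvStepB (-1, none, none)
      = (maximumDifferenceConstraint1 xs, pvMfold (pvCls 0 xs), pvMfold (pvCls 1 xs)) := by
  induction xs using List.reverseRecOn with
  | nil => decide
  | append_singleton xs v ih =>
    rw [PySem.List.enumerate_append, List.foldl_append, ih]
    simp only [PySem.List.enumerate_cons, PySem.List.enumerate_nil, List.foldl_cons,
      List.foldl_nil, zero_add]
    rw [pvA_snoc xs v, pvEall_char xs v _ (pvA_ge xs), pvCls_snoc 0, pvCls_snoc 1]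
    have hP : PySem.Int.mod ((xs.length : Int)) 2 = 0 ∨
        PySem.Int.mod ((xs.length : Int)) 2 = 1 := by
      have h1 := PySem.Int.mod_nonneg (a := ((xs.length : Int))) (b := 2) (by norm_num)
      have h2 := PySem.Int.mod_lt (a := ((xs.length : Int))) (b := 2) (by norm_num)
      omega
    rcases hP with hP | hP
    · simp only [pvStepB]
      rw [hP]
      simp only [show ((0:Int) = 1) = False from by norm_num, if_true, if_false,
        List.append_nil]
      rw [pvMfold_snoc]
      cases hmm : pvMfold (pvCls 0 xs) with
      | none => rfl
      | some m =>
        dsimp only [Option.elim]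
        simp only [Prod.mk.injEq]
        refine ⟨?_, ?_, trivial⟩
        · rcases lt_or_ge m v with h | h
          · rw [if_pos h, if_pos h, max_def]; split_ifs <;> omega
          · rw [if_neg (not_lt.mpr h), if_neg (not_lt.mpr h)]
        · split_ifs with h
          · rw [min_eq_right (le_of_lt h)]
          · rw [min_eq_left (not_lt.mp h)]
    · simp only [pvStepB]
      rw [hP]
      simp only [show ((1:Int) = 0) = False from by norm_num, if_true, if_false,
        List.append_nil]
      rw [pvMfold_snoc]
      cases hmm : pvMfold (pvCls 1 xs) with
      | none => rfl
      | some m =>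
        dsimp only [Option.elim]
        simp only [Prod.mk.injEq]
        refine ⟨?_, trivial, ?_⟩
        · rcases lt_or_ge m v with h | h
          · rw [if_pos h, if_pos h, max_def]; split_ifs <;> omega
          · rw [if_neg (not_lt.mpr h), if_neg (not_lt.mpr h)]
        · split_ifs with h
          · rw [min_eq_right (le_of_lt h)]
          · rw [min_eq_left (not_lt.mp h)]

-- ===== VERDICT (by name: the statement is the Claim_ definition above) =====
theorem maximumDifferenceConstraint1_spec : Claim_equal_maximumDifferenceConstraint1 := by
  intro nums _
  unfold Spec_maximumDifferenceConstraint1 maximumDifferenceConstraint1_alt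
  rw [pvB_state]
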